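-- pv_equiv track=rewrite | github.com/goblinvitya/python | buns/mod2/type11.py | check_duplicate_digits
-- ===== SOURCE A (Python) =====
-- def check_duplicate_digits(sequence):
--     digits = set()
--     for num in sequence:
--         for digit in str(num):
--             if digit in digits:
--                 return True
--             digits.add(digit)
--     return False
-- ===== SOURCE B (Python) =====
-- def check_duplicate_digits(sequence):
--     chars = sorted(ch for num in sequence for ch in str(num))
--     return any(a == b for a, b in zip(chars, chars[1:]))
-- ===== Notes on version B (the rewrite author's own statement) =====
-- stated objective: alternative
-- what changed: B replaces A's incremental seen-set with early return by a sort of all digit characters followed by an adjacent-equal scan: a duplicate exists iff two equal characters end up next to each other after sorting.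
import Mathlib
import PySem

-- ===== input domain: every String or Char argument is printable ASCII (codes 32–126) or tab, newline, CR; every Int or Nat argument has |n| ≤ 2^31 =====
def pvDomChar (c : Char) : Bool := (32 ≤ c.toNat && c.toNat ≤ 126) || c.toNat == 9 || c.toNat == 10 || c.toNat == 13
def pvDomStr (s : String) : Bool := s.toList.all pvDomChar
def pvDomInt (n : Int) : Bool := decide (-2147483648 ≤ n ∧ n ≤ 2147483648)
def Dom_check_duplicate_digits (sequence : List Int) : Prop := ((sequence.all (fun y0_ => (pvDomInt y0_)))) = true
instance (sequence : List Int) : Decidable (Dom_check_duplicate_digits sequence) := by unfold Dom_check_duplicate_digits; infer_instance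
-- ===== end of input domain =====

-- B sorts all digit characters and scans adjacent pairs for an equal neighbour,
-- instead of A's incremental seen-set loop with early return (objective: alternative).

-- ===== PORT A =====
-- inner 'for digit in str(num)' loop: none = early 'return True', some s = updated seen-set
def cddGoChars : List Char → PySem.Set Char → Option (PySem.Set Char)
  | [], s => some s
  | c :: cs, s =>
      if PySem.Set.contains s c then none
      else cddGoChars cs (PySem.Set.add s c)

-- outer 'for num in sequence' loop carrying the 'digits' set
def cddGoNums : List Int → PySem.Set Char → Bool
  | [], _ => false
  | n :: ns, s =>
      match cddGoChars (PySem.Int.toChars n) s with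
      | none => true
      | some s' => cddGoNums ns s'

def check_duplicate_digits (sequence : List Int) : Bool :=
  cddGoNums sequence PySem.Set.empty

-- ===== PORT B =====
-- chars = sorted(ch for num in sequence for ch in str(num));
-- any(a == b for a, b in zip(chars, chars[1:]))  — chars[1:] is chars.tail
def check_duplicate_digits_alt (sequence : List Int) : Bool :=
  let chars := PySem.List.sorted (sequence.flatMap (fun n => PySem.Int.toChars n)) (fun c => c) false
  (chars.zip chars.tail).any (fun p => p.1 == p.2)

-- ===== PRECONDITION & SPEC =====
def Spec_check_duplicate_digits (sequence : List Int) (out : Bool) : Prop := out = check_duplicate_digits_alt sequence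
instance (sequence : List Int) (out : Bool) : Decidable (Spec_check_duplicate_digits sequence out) := by unfold Spec_check_duplicate_digits; infer_instance

-- ===== CLAIM (what is proved, stated in full; the proofs are below) =====
def Claim_equal_check_duplicate_digits : Prop := ∀ (sequence : List Int), Dom_check_duplicate_digits sequence → Spec_check_duplicate_digits sequence (check_duplicate_digits sequence)

-- ===== LEMMAS AND PROOFS =====

-- the inner loop succeeds exactly when appending the chars keeps the seen-set duplicate-free
theorem cddGoChars_eq (cs : List Char) : ∀ (s : PySem.Set Char), s.Nodup →
    cddGoChars cs s = if (s ++ cs).Nodup then some (s ++ cs) else none := by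
  induction cs with
  | nil => intro s hs; simp [cddGoChars, hs]
  | cons c cs ih =>
    intro s hs
    by_cases hc : c ∈ s
    · have hct : PySem.Set.contains s c = true := (PySem.Set.contains_iff s c).2 hc
      have hnd : ¬ (s ++ c :: cs).Nodup := by
        intro h
        exact (List.disjoint_of_nodup_append h) hc List.mem_cons_self
      rw [if_neg hnd]
      show (if PySem.Set.contains s c = true then none else cddGoChars cs (PySem.Set.add s c)) = none
      rw [if_pos hct]
    · have hct : PySem.Set.contains s c = false := by
        cases h : PySem.Set.contains s c
        · rfl
        · exact absurd ((PySem.Set.contains_iff s c).1 h) hc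
      have hadd : PySem.Set.add s c = s ++ [c] := by
        simp only [PySem.Set.add, hct, Bool.false_eq_true, if_false]
      have hnodup : (s ++ [c]).Nodup := by
        rw [List.nodup_append]
        refine ⟨hs, List.nodup_singleton c, ?_⟩
        intro a ha b hb heq
        rw [List.mem_singleton] at hb
        exact hc (by rw [← hb, ← heq]; exact ha)
      show (if PySem.Set.contains s c = true then none else cddGoChars cs (PySem.Set.add s c)) = _
      rw [if_neg (by rw [hct]; simp), hadd, ih (s ++ [c]) hnodup]
      simp [List.append_assoc]

-- the outer loop returns false exactly when seen-set ++ all remaining digit chars is duplicate-free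
theorem cddGoNums_eq (ns : List Int) : ∀ (s : PySem.Set Char), s.Nodup →
    cddGoNums ns s = !decide ((s ++ ns.flatMap (fun n => PySem.Int.toChars n)).Nodup) := by
  induction ns with
  | nil => intro s hs; simp [cddGoNums, hs]
  | cons n ns ih =>
    intro s hs
    rw [show cddGoNums (n :: ns) s =
      (match cddGoChars (PySem.Int.toChars n) s with
       | none => true
       | some s' => cddGoNums ns s') from rfl]
    rw [cddGoChars_eq (PySem.Int.toChars n) s hs]
    by_cases h : (s ++ PySem.Int.toChars n).Nodup
    · rw [if_pos h]
      show cddGoNums ns (s ++ PySem.Int.toChars n) = _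
      rw [ih _ h]
      simp [List.append_assoc]
    · rw [if_neg h]
      have hfull : ¬ (s ++ (PySem.Int.toChars n ++
          ns.flatMap (fun n => PySem.Int.toChars n))).Nodup := by
        intro hfull
        apply h
        have hsub : (s ++ PySem.Int.toChars n).Sublist
            (s ++ (PySem.Int.toChars n ++ ns.flatMap (fun n => PySem.Int.toChars n))) := by
          apply List.Sublist.append_left
          simp
        exact hsub.nodup hfull
      simp [List.flatMap_cons, hfull]

-- on a weakly increasing list, some adjacent pair is equal iff the list has a duplicate
theorem adjAny_eq (l : List Char) (hl : l.Pairwise (· ≤ ·)) :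
    ((l.zip l.tail).any (fun p => p.1 == p.2)) = !decide l.Nodup := by
  induction l with
  | nil => simp
  | cons a t ih =>
    cases t with
    | nil => simp
    | cons b t' =>
      rw [List.pairwise_cons] at hl
      obtain ⟨hale, hbt⟩ := hl
      have hab : a ≤ b := hale b List.mem_cons_self
      by_cases heq : a = b
      · have hdup : ¬ (a :: b :: t').Nodup := by
          intro h
          rw [List.nodup_cons] at h
          exact h.1 (heq ▸ List.mem_cons_self)
        simp [List.zip, heq]
      · have hanotin : a ∉ b :: t' := by
          intro hmem
          rcases List.mem_cons.1 hmem with h | h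
          · exact heq h
          · rw [List.pairwise_cons] at hbt
            have : b ≤ a := hbt.1 a h
            exact heq (le_antisymm hab this)
        have ihres := ih hbt
        have : ((a :: b :: t').zip (b :: t')).any (fun p => p.1 == p.2)
            = ((a == b) || ((b :: t').zip t').any (fun p => p.1 == p.2)) := by
          simp [List.zip]
        rw [show ((a :: b :: t').tail) = b :: t' from rfl, this]
        have habne : (a == b) = false := by simp [heq]
        rw [habne, Bool.false_or]
        simp only [List.tail] at ihres
        rw [ihres]
        have : (a :: b :: t').Nodup ↔ (b :: t').Nodup := by
          rw [List.nodup_cons]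
          exact ⟨fun h => h.2, fun h => ⟨hanotin, h⟩⟩
        by_cases h2 : (b :: t').Nodup
        · simp [h2, this.2 h2]
        · have hnd : ¬(a :: b :: t').Nodup := fun hh => h2 (this.1 hh)
          simp [h2, hnd]

-- ===== VERDICT (by name: the statement is the Claim_ definition above) =====
theorem check_duplicate_digits_spec : Claim_equal_check_duplicate_digits := by
  intro sequence _
  unfold Spec_check_duplicate_digits check_duplicate_digits check_duplicate_digits_alt
  rw [cddGoNums_eq sequence PySem.Set.empty List.nodup_nil]
  simp only [PySem.Set.empty, List.nil_append]
  set L := sequence.flatMap (fun n => PySem.Int.toChars n) with hL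
  set S := PySem.List.sorted L (fun c => c) false with hS
  have hperm : S.Perm L := PySem.List.sorted_perm L (fun c => c) false
  have hpw : S.Pairwise (fun a b => (fun c => c) a ≤ (fun c => c) b) :=
    PySem.List.sorted_pairwise L (fun c => c)
  have := adjAny_eq S (by simpa using hpw)
  rw [this]
  by_cases h : L.Nodup
  · simp [h, hperm.nodup_iff.2 h]
  · have hs : ¬S.Nodup := fun hh => h (hperm.nodup_iff.1 hh)
    simp [h, hs]
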